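-- pv_equiv track=rewrite | github.com/daniel-reich/ubiquitous-fiesta | YrNbakR7Y4vLz6bFs_9.py | combinator
-- ===== SOURCE A (Python) =====
-- import itertools
--
-- def combinator(lst, sep=""):
--   if lst == [[]]:
--     return []
--   if len(lst) == 1:
--     return lst[0]
--   for i, l in enumerate(lst):
--     if type(l) == str:
--       lst[i] = list(l)
--   pairs = list(itertools.product(*lst))
--   try:
--     return list(map(lambda pair: sep.join(pair), pairs))
--   except IndexError:
--     return []
-- ===== SOURCE B (Python) =====
-- def combinator(lst, sep=""):
--   # B: same two guards as A, then the Cartesian product + join computed in one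
--   # right-to-left recursion that builds the joined strings directly (no tuple
--   # intermediates, no itertools).
--   if lst == [[]]:
--     return []
--   if len(lst) == 1:
--     return lst[0]
--   def rec(ls):
--     if not ls:
--       return [""]
--     if len(ls) == 1:
--       return list(ls[0])
--     rest = rec(ls[1:])
--     return [x + sep + r for x in ls[0] for r in rest]
--   return rec(lst)
-- ===== Notes on version B (the rewrite author's own statement) =====
-- stated objective: alternative
-- what changed: Replaces itertools.product + a second pass of sep.join over tuples by a single right-to-left recursion that builds the joined strings directly, never materialising the tuples.
import Mathlib
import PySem

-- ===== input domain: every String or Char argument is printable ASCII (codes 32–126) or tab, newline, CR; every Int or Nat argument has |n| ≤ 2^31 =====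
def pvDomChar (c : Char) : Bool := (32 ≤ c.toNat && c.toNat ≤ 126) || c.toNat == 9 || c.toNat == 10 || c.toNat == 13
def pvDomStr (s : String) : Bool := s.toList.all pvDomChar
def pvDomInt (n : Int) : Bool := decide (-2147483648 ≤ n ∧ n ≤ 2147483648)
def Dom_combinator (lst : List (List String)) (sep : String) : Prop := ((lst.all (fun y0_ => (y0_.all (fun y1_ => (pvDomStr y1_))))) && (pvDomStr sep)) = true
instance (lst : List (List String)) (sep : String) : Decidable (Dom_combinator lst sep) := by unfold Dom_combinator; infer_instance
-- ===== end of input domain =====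

-- B replaces itertools.product + a second sep.join pass by one right-to-left recursion
-- that builds the joined strings directly (alternative decomposition, same cost).
-- A's in-place str→list conversion loop never fires on List (List String) inputs, so
-- neither version mutates its argument on this domain.

-- ===== PORT A =====
-- the `for i, l in enumerate(lst): if type(l) == str: …` loop is a no-op here: every
-- element is a list, never a str (exact on this domain).
-- `sep.join(pair)` on a tuple of strings never raises IndexError, so the except branch
-- is dead (exact); itertools.product is ported as its documented left fold.
def combinator (lst : List (List String)) (sep : String) : List String :=
  if lst = [[]] then []
  else if lst.length = 1 then lst.headD []
  else
    let pairs := lst.foldl (fun acc l => acc.flatMap (fun p => l.map (fun x => p ++ [x]))) [[]]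
    pairs.map (fun pair => PySem.Str.join sep pair)

-- ===== PORT B =====
def prodJoinB (sep : String) : List (List String) → List String
  | [] => [""]
  | [l] => l
  | l :: l' :: rest =>
      l.flatMap (fun x => (prodJoinB sep (l' :: rest)).map (fun r => x ++ sep ++ r))

def combinator_alt (lst : List (List String)) (sep : String) : List String :=
  if lst = [[]] then []
  else if lst.length = 1 then lst.headD []
  else prodJoinB sep lst

-- ===== PRECONDITION & SPEC =====
def Spec_combinator (lst : List (List String)) (sep : String) (out : List String) : Prop := out = combinator_alt lst sep
instance (lst : List (List String)) (sep : String) (out : List String) : Decidable (Spec_combinator lst sep out) := by unfold Spec_combinator; infer_instance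

-- ===== CLAIM (what is proved, stated in full; the proofs are below) =====
def Claim_equal_combinator : Prop := ∀ (lst : List (List String)) (sep : String), Dom_combinator lst sep → Spec_combinator lst sep (combinator lst sep)

-- ===== LEMMAS AND PROOFS =====

-- the product built right-to-left (rightmost list fastest, like itertools.product)
def prodR : List (List String) → List (List String)
  | [] => [[]]
  | l :: rest => l.flatMap (fun x => (prodR rest).map (fun p => x :: p))

theorem foldl_step_eq (lst : List (List String)) (acc : List (List String)) :
    lst.foldl (fun acc l => acc.flatMap (fun p => l.map (fun x => p ++ [x]))) acc
      = acc.flatMap (fun p => (prodR lst).map (fun q => p ++ q)) := by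
  induction lst generalizing acc with
  | nil => simp [prodR]
  | cons l rest ih =>
      simp only [List.foldl_cons, ih, prodR]
      simp [List.flatMap_assoc, List.map_flatMap, List.flatMap_map, List.map_map,
            Function.comp_def, List.append_assoc]

theorem mem_prodR_length (lst : List (List String)) (p : List String)
    (hp : p ∈ prodR lst) : p.length = lst.length := by
  induction lst generalizing p with
  | nil => simp [prodR] at hp; simp [hp]
  | cons l rest ih =>
      simp only [prodR, List.mem_flatMap, List.mem_map] at hp
      obtain ⟨x, _, q, hq, rfl⟩ := hp
      simp [ih q hq]

theorem str_join_nil (sep : String) : PySem.Str.join sep [] = "" := by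
  apply String.toList_inj.mp
  have h := PySem.Str.toList_join sep []
  simp only [List.map_nil] at h
  rw [PySem.Chars.join_nil] at h
  rw [h]; rfl

theorem str_join_singleton (sep x : String) : PySem.Str.join sep [x] = x := by
  apply String.toList_inj.mp
  have h := PySem.Str.toList_join sep [x]
  simp only [List.map_cons, List.map_nil] at h
  rw [PySem.Chars.join_singleton] at h
  exact h

theorem str_join_cons (sep x p : String) (ps : List String) :
    PySem.Str.join sep (x :: p :: ps) = x ++ sep ++ PySem.Str.join sep (p :: ps) := by
  apply String.toList_inj.mp
  have h1 := PySem.Str.toList_join sep (x :: p :: ps)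
  have h2 := PySem.Str.toList_join sep (p :: ps)
  rw [h1]
  simp only [List.map_cons, PySem.Chars.join_cons_cons]
  simp [h2]

theorem map_join_prodR (sep : String) (lst : List (List String)) :
    (prodR lst).map (fun pair => PySem.Str.join sep pair) = prodJoinB sep lst := by
  induction lst with
  | nil => simp [prodR, prodJoinB, str_join_nil]
  | cons l rest ih =>
      cases rest with
      | nil =>
          simp only [prodR, prodJoinB]
          rw [show (List.flatMap (fun x => List.map (fun p => x :: p) [[]]) l)
                = l.map (fun x => [x]) from by
            induction l with
            | nil => rfl
            | cons a t iht => simp only [List.map_cons, List.map_nil] at iht; simp [iht]]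
          simp [List.map_map, Function.comp_def, str_join_singleton]
      | cons l' rest' =>
          have hunfold : prodR (l :: l' :: rest')
              = l.flatMap (fun x => (prodR (l' :: rest')).map (fun p => x :: p)) := rfl
          have hB : prodJoinB sep (l :: l' :: rest')
              = l.flatMap (fun x => (prodJoinB sep (l' :: rest')).map (fun r => x ++ sep ++ r)) := rfl
          rw [hunfold, hB, ← ih]
          simp only [List.map_flatMap, List.map_map]
          apply List.flatMap_congr
          intro x _
          apply List.map_congr_left
          intro q hq
          have hlen := mem_prodR_length _ q hq
          cases q with
          | nil => simp at hlen
          | cons a as => simp [str_join_cons]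

theorem core_eq (sep : String) (lst : List (List String)) :
    (lst.foldl (fun acc l => acc.flatMap (fun p => l.map (fun x => p ++ [x]))) [[]]).map
      (fun pair => PySem.Str.join sep pair) = prodJoinB sep lst := by
  rw [foldl_step_eq]
  simp only [List.flatMap_cons, List.flatMap_nil, List.append_nil, List.nil_append,
    List.map_id']
  simpa using map_join_prodR sep lst

-- ===== VERDICT (by name: the statement is the Claim_ definition above) =====
theorem combinator_spec : Claim_equal_combinator := by
  intro lst sep _
  unfold Spec_combinator combinator combinator_alt
  split_ifs with h1 h2
  · rfl
  · rfl
  · exact core_eq sep lst
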